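-- pv_equiv track=rewrite | github.com/prettyGoo/computing_translator | example_ser.py | num_mb_real
-- ===== SOURCE A (Python) =====
-- def num_mb_real(num):
--     exponent = False
--     for i in num:
--         if i in ('e', 'E'):
--             if not exponent:
--                 exponent = True
--             else:
--                 return False
--         elif not i.isdigit():
--             return False
--
--     return True
-- ===== SOURCE B (Python) =====
-- def num_mb_real(num):
--     if sum(1 for c in num if c in ('e', 'E')) > 1:
--         return False
--     return all(c.isdigit() for c in num if c not in ('e', 'E'))
-- ===== Notes on version B (the rewrite author's own statement) =====
-- stated objective: simpler
-- what changed: Replaces the single stateful flag-tracking scan with early returns by a two-pass decomposition: count exponent characters first (reject if more than one), then check that every remaining character is a digit.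
import Mathlib
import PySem

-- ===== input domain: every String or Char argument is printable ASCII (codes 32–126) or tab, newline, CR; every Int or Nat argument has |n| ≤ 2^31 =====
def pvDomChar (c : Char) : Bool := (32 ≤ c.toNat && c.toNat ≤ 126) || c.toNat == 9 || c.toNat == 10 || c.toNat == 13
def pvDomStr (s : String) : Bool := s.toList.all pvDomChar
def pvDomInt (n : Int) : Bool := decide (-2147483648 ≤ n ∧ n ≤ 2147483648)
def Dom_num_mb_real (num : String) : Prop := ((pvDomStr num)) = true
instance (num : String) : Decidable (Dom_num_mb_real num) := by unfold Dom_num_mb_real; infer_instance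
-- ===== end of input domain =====

-- B replaces A's single stateful flag-tracking scan by a two-pass decomposition:
-- count exponent characters, then check the remaining characters are all digits.

-- ===== PORT A =====
-- the for-loop with the 'exponent' flag and early returns
def numMbRealLoop : Bool → List Char → Bool
  | _, [] => true
  | exponent, i :: rest =>
    if i == 'e' || i == 'E' then
      if !exponent then numMbRealLoop true rest
      else false
    else if !(PySem.Chars.isdigit i) then false
    else numMbRealLoop exponent rest

def num_mb_real (num : String) : Bool := numMbRealLoop false num.toList

-- ===== PORT B =====
def num_mb_real_alt (num : String) : Bool :=
  -- sum(1 for c in num if c in ('e','E')) > 1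
  if num.toList.countP (fun c => c == 'e' || c == 'E') > 1 then false
  -- all(c.isdigit() for c in num if c not in ('e','E'))
  else (num.toList.filter (fun c => !(c == 'e' || c == 'E'))).all PySem.Chars.isdigit

-- ===== PRECONDITION & SPEC =====
def Spec_num_mb_real (num : String) (out : Bool) : Prop := out = num_mb_real_alt num
instance (num : String) (out : Bool) : Decidable (Spec_num_mb_real num out) := by unfold Spec_num_mb_real; infer_instance

-- ===== CLAIM (what is proved, stated in full; the proofs are below) =====
def Claim_equal_num_mb_real : Prop := ∀ (num : String), Dom_num_mb_real num → Spec_num_mb_real num (num_mb_real num)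

-- ===== LEMMAS AND PROOFS =====

-- A's loop, characterised: true iff (count of e/E) + (flag already set) ≤ 1 and all non-e/E chars are digits
theorem numMbRealLoop_eq (l : List Char) (exponent : Bool) :
    numMbRealLoop exponent l =
      (decide (l.countP (fun c => c == 'e' || c == 'E') + (cond exponent 1 0) ≤ 1)
        && (l.filter (fun c => !(c == 'e' || c == 'E'))).all PySem.Chars.isdigit) := by
  induction l generalizing exponent with
  | nil => cases exponent <;> rfl
  | cons i rest ih =>
    by_cases he : (i == 'e' || i == 'E') = true
    · cases exponent with
      | true =>
        have h2 : ¬ (List.countP (fun c => c == 'e' || c == 'E') (i :: rest)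
            + (cond true 1 0) ≤ 1) := by
          rw [List.countP_cons_of_pos (l := rest) he]; simp only [Bool.cond_true]; omega
        simp [numMbRealLoop, he, decide_eq_false h2]
      | false =>
        have hstep : numMbRealLoop false (i :: rest) = numMbRealLoop true rest := by
          simp [numMbRealLoop, he]
        have hcount : List.countP (fun c => c == 'e' || c == 'E') (i :: rest) + (cond false 1 0)
            = List.countP (fun c => c == 'e' || c == 'E') rest + (cond true 1 0) := by
          rw [List.countP_cons_of_pos (l := rest) he]; simp only [Bool.cond_true, Bool.cond_false]
        have hfilter : (i :: rest).filter (fun c => !(c == 'e' || c == 'E'))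
            = rest.filter (fun c => !(c == 'e' || c == 'E')) := by
          have h := he; simp only [Bool.or_eq_true, beq_iff_eq] at h
          rcases h with h | h <;> simp [List.filter_cons, h]
        rw [hstep, ih, hcount, hfilter]
    · have he' : (i == 'e' || i == 'E') = false := by
        cases h : (i == 'e' || i == 'E') <;> simp_all
      have hcount : List.countP (fun c => c == 'e' || c == 'E') (i :: rest)
          = List.countP (fun c => c == 'e' || c == 'E') rest := by
        exact List.countP_cons_of_neg (l := rest) (by simp [he'])
      have hfilter : (i :: rest).filter (fun c => !(c == 'e' || c == 'E'))
          = i :: rest.filter (fun c => !(c == 'e' || c == 'E')) := by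
        have h := he'; simp only [Bool.or_eq_false_iff, beq_eq_false_iff_ne, ne_eq] at h
        simp [List.filter_cons, h.1, h.2]
      by_cases hd : PySem.Chars.isdigit i = true
      · have hstep : numMbRealLoop exponent (i :: rest) = numMbRealLoop exponent rest := by
          simp [numMbRealLoop, he', hd]
        rw [hstep, ih, hcount, hfilter]
        simp [hd]
      · have hstep : numMbRealLoop exponent (i :: rest) = false := by
          simp [numMbRealLoop, he', hd]
        rw [hstep, hcount, hfilter]
        simp [hd]

-- ===== VERDICT (by name: the statement is the Claim_ definition above) =====
theorem num_mb_real_spec : Claim_equal_num_mb_real := by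
  intro num _
  unfold Spec_num_mb_real num_mb_real num_mb_real_alt
  rw [numMbRealLoop_eq]
  split_ifs with h
  · simp [Nat.lt_iff_add_one_le] at h ⊢
    omega
  · simp
    omega
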